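-- pv_equiv track=rewrite | github.com/ZhiqiLi-github/Web | src/gamma.py | gamma_encode_number
-- ===== SOURCE A (Python) =====
-- def gamma_encode_number(a):
-- 	temp = bin(a)
-- 	res = temp.replace('0b','')
-- 	le = len(res)
-- 	res = res[1:len(res)]
-- 	for i in range(le):
-- 		if i ==0:
-- 			res = '0'+res
-- 		else:
-- 			res = '1'+res
-- 	return res
-- ===== SOURCE B (Python) =====
-- def gamma_encode_number(a):
--     s = bin(a).replace('0b', '')
--     return '1' * (len(s) - 1) + '0' + s[1:]
-- ===== Notes on version B (the rewrite author's own statement) =====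
-- stated objective: simpler
-- what changed: Replaces A's character-by-character prepend loop with a closed-form string expression '1'*(len(s)-1)+'0'+s[1:] built from bin(a).
import Mathlib
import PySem

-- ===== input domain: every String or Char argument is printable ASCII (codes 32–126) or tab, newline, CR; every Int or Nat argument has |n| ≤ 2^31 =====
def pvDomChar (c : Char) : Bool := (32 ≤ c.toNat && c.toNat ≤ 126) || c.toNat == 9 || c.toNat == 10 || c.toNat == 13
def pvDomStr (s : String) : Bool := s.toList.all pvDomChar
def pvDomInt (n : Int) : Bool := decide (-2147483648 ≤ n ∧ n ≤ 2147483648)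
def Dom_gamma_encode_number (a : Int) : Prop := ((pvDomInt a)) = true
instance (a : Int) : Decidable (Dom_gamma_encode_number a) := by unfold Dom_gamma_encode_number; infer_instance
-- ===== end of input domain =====

-- B replaces A's character-by-character prepend loop with the closed-form
-- expression '1'*(len(s)-1) + '0' + s[1:] (objective: simpler).

-- ===== PORT A =====
def gamma_encode_number (a : Int) : String :=
  let temp := PySem.Int.pyBin a
  let res := PySem.Str.replace temp "0b" ""
  let le := PySem.Str.len res
  let res := PySem.Str.slice res (some 1) (some (PySem.Str.len res))
  -- for i in range(le): res = ('0' if i == 0 else '1') + res   (string concat done on char lists)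
  (PySem.List.pyRange 0 le 1).foldl
    (fun res i =>
      if i == 0 then String.ofList ('0' :: res.toList)
      else String.ofList ('1' :: res.toList)) res

-- ===== PORT B =====
def gamma_encode_number_alt (a : Int) : String :=
  let s := PySem.Str.replace (PySem.Int.pyBin a) "0b" ""
  -- '1' * (len(s) - 1) + '0' + s[1:]   (string repetition/concat done on char lists)
  String.ofList (List.replicate (PySem.Str.len s - 1).toNat '1' ++
    '0' :: (PySem.Str.slice s (some 1) none).toList)

-- ===== PRECONDITION & SPEC =====
def Spec_gamma_encode_number (a : Int) (out : String) : Prop := out = gamma_encode_number_alt a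
instance (a : Int) (out : String) : Decidable (Spec_gamma_encode_number a out) := by unfold Spec_gamma_encode_number; infer_instance

-- ===== CLAIM (what is proved, stated in full; the proofs are below) =====
def Claim_equal_gamma_encode_number : Prop := ∀ (a : Int), Dom_gamma_encode_number a → Spec_gamma_encode_number a (gamma_encode_number a)

-- ===== LEMMAS AND PROOFS =====

-- characters produced by Nat.toDigits 2 are binary digits
lemma toDigitsCore_two_mem (fuel : Nat) : ∀ (n : Nat) (ds : List Char),
    (∀ c ∈ ds, c = '0' ∨ c = '1') → ∀ c ∈ Nat.toDigitsCore 2 fuel n ds, c = '0' ∨ c = '1' := by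
  induction fuel with
  | zero => intro n ds h c hc; simp [Nat.toDigitsCore] at hc; exact h c hc
  | succ fuel ih =>
    intro n ds h c hc
    have hd : (n % 2).digitChar = '0' ∨ (n % 2).digitChar = '1' := by
      have : n % 2 = 0 ∨ n % 2 = 1 := Nat.mod_two_eq_zero_or_one n
      rcases this with h0 | h1
      · left; simp [h0, Nat.digitChar]
      · right; simp [h1, Nat.digitChar]
    simp only [Nat.toDigitsCore] at hc
    split at hc
    · rw [List.mem_cons] at hc
      rcases hc with rfl | hc
      · exact hd
      · exact h c hc
    · exact ih (n / 2) _ (by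
        intro c' hc'
        rw [List.mem_cons] at hc'
        rcases hc' with rfl | hc'
        · exact hd
        · exact h c' hc') c hc

lemma toDigitsCore_two_ne_nil (fuel : Nat) : ∀ (n : Nat) (ds : List Char),
    ds ≠ [] → Nat.toDigitsCore 2 fuel n ds ≠ [] := by
  induction fuel with
  | zero => intro n ds h; simpa [Nat.toDigitsCore] using h
  | succ fuel ih =>
    intro n ds h
    simp only [Nat.toDigitsCore]
    split
    · simp
    · exact ih (n / 2) _ (by simp)

lemma toDigits_two_mem (n : Nat) : ∀ c ∈ Nat.toDigits 2 n, c = '0' ∨ c = '1' :=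
  toDigitsCore_two_mem (n + 1) n [] (by simp)

lemma toDigits_two_ne_nil (n : Nat) : Nat.toDigits 2 n ≠ [] := by
  show Nat.toDigitsCore 2 (n + 1) n [] ≠ []
  simp only [Nat.toDigitsCore]
  split
  · simp
  · exact toDigitsCore_two_ne_nil n (n / 2) _ (by simp)

-- replace's worker leaves a list of binary digits untouched (no '0b' occurs in it)
lemma replace_go_digits (fuel : Nat) : ∀ (l acc : List Char),
    (∀ c ∈ l, c = '0' ∨ c = '1') → l.length ≤ fuel →
    PySem.Chars.replace.go ['0', 'b'] [] fuel l acc = acc.reverse ++ l := by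
  induction fuel with
  | zero =>
    intro l acc _ hlen
    have : l = [] := List.eq_nil_of_length_eq_zero (Nat.le_zero.mp hlen)
    subst this; simp [PySem.Chars.replace.go]
  | succ fuel ih =>
    intro l acc hmem hlen
    cases l with
    | nil => simp [PySem.Chars.replace.go]
    | cons c t =>
      have hpre : List.isPrefixOf ['0', 'b'] (c :: t) = false := by
        cases t with
        | nil => simp [List.isPrefixOf]
        | cons c' t' =>
          have : c' = '0' ∨ c' = '1' := hmem c' (by simp)
          rcases this with rfl | rfl <;> simp [List.isPrefixOf]
      simp only [PySem.Chars.replace.go, hpre]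
      rw [ih t (c :: acc) (fun c' hc' => hmem c' (by simp [hc']))
        (by simpa using Nat.lt_succ_iff.mp (by simpa using hlen))]
      simp

-- the stripped bitstring: replace(bin(a), '0b', '') character list
lemma replace_pyBin (a : Int) :
    (PySem.Str.replace (PySem.Int.pyBin a) "0b" "").toList =
      (if a < 0 then ['-'] else []) ++ Nat.toDigits 2 a.natAbs := by
  rw [PySem.Str.toList_replace, PySem.Int.toList_pyBin]
  unfold PySem.Int.toBinChars0b
  by_cases h : a < 0
  · simp only [h, if_pos]
    have h2 : ("0b".toList) = ['0', 'b'] := by decide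
    have h3 : ("".toList) = ([] : List Char) := by decide
    rw [h2, h3]
    unfold PySem.Chars.replace
    simp only [List.isEmpty_iff, if_neg (by simp : ¬ (['0','b'] = ([] : List Char)))]
    have hlen : ('-' :: '0' :: 'b' :: Nat.toDigits 2 a.natAbs).length =
        (Nat.toDigits 2 a.natAbs).length + 3 := by simp
    rw [hlen]
    simp only [PySem.Chars.replace.go,
      (by simp [List.isPrefixOf] : List.isPrefixOf ['0', 'b'] ('-' :: '0' :: 'b' :: Nat.toDigits 2 a.natAbs) = false),
      (by simp [List.isPrefixOf] : List.isPrefixOf ['0', 'b'] ('0' :: 'b' :: Nat.toDigits 2 a.natAbs) = true)]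
    rw [show ('0' :: 'b' :: Nat.toDigits 2 a.natAbs).drop (['0','b'].length) = Nat.toDigits 2 a.natAbs by simp]
    rw [replace_go_digits _ _ _ (toDigits_two_mem a.natAbs) (by simp)]
    simp
  · simp only [h, if_false]
    have h2 : ("0b".toList) = ['0', 'b'] := by decide
    have h3 : ("".toList) = ([] : List Char) := by decide
    rw [h2, h3]
    unfold PySem.Chars.replace
    simp only [List.isEmpty_iff, if_neg (by simp : ¬ (['0','b'] = ([] : List Char)))]
    rw [show a.toNat = a.natAbs by omega]
    have hlen : ('0' :: 'b' :: Nat.toDigits 2 a.natAbs).length =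
        (Nat.toDigits 2 a.natAbs).length + 2 := by simp
    rw [hlen]
    simp only [PySem.Chars.replace.go,
      (by simp [List.isPrefixOf] : List.isPrefixOf ['0', 'b'] ('0' :: 'b' :: Nat.toDigits 2 a.natAbs) = true)]
    rw [show ('0' :: 'b' :: Nat.toDigits 2 a.natAbs).drop (['0','b'].length) = Nat.toDigits 2 a.natAbs by simp]
    rw [replace_go_digits _ _ _ (toDigits_two_mem a.natAbs) (by simp)]
    simp

lemma replace_pyBin_ne_nil (a : Int) :
    (PySem.Str.replace (PySem.Int.pyBin a) "0b" "").toList ≠ [] := by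
  rw [replace_pyBin]
  intro h
  rcases List.append_eq_nil_iff.mp h with ⟨_, h2⟩
  exact toDigits_two_ne_nil a.natAbs h2

-- A's loop for i = 1 .. n: every iteration prepends '1'
lemma loop_tail (n : Nat) : ∀ (r : String),
    (PySem.List.pyRange 1 (1 + (n : Int)) 1).foldl
      (fun res i =>
        if i == 0 then String.ofList ('0' :: res.toList)
        else String.ofList ('1' :: res.toList)) r =
      String.ofList (List.replicate n '1' ++ r.toList) := by
  induction n with
  | zero =>
    intro r
    rw [show (1 + ((0 : Nat) : Int) = 1) by simp, PySem.List.pyRange_one_eq_nil le_rfl]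
    simp
  | succ n ih =>
    intro r
    rw [show (1 + (((n + 1 : Nat)) : Int) = (1 + (n : Int)) + 1) by push_cast; ring,
      PySem.List.pyRange_one_succ_right (by omega), List.foldl_append, ih]
    simp only [List.foldl_cons, List.foldl_nil]
    rw [if_neg (by simp only [beq_iff_eq]; omega), String.toList_ofList]
    simp [List.replicate_succ]

-- ===== VERDICT (by name: the statement is the Claim_ definition above) =====
theorem gamma_encode_number_spec : Claim_equal_gamma_encode_number := by
  intro a _
  simp only [Spec_gamma_encode_number, gamma_encode_number, gamma_encode_number_alt]
  generalize hs : PySem.Str.replace (PySem.Int.pyBin a) "0b" "" = s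
  have hne : s.toList ≠ [] := hs ▸ replace_pyBin_ne_nil a
  obtain ⟨m, hm⟩ : ∃ m : Nat, s.toList.length = m + 1 :=
    ⟨s.toList.length - 1, by have := List.length_pos_iff.mpr hne; omega⟩
  rw [PySem.Str.len_eq, hm]
  have hinit : (PySem.Str.slice s (some 1) (some (1 + (m : Int)))).toList = s.toList.drop 1 := by
    rw [PySem.Str.toList_slice]
    show PySem.List.slice s.toList (some 1) (some (1 + (m : Int))) = s.toList.drop 1
    rw [PySem.List.slice_toNat _ (by norm_num) (by omega)]
    rw [show ((1 : Int)).toNat = 1 from rfl, show ((1 + (m : Int))).toNat = m + 1 by omega]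
    exact List.take_of_length_le (by simp [hm])
  have htail : (PySem.Str.slice s (some 1) none).toList = s.toList.drop 1 := by
    rw [PySem.Str.toList_slice]
    show PySem.List.slice s.toList (some 1) none = s.toList.drop 1
    rw [PySem.List.slice_from _ (by norm_num)]
    norm_num
  rw [htail, PySem.List.pyRange_one_cons (by omega)]
  simp only [List.foldl_cons, beq_self_eq_true, if_true]
  rw [show ((0 : Int) + 1) = 1 by ring,
    show (((m + 1 : Nat)) : Int) = 1 + (m : Int) by push_cast; ring,
    loop_tail m, String.toList_ofList, hinit,
    show ((1 + (m : Int) - 1)).toNat = m by omega]
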